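-- pv_equiv track=rewrite | github.com/bober20/lab_igi_4sem | igi/lr3/IGI_LR3/task4.py | find_the_longest_word
-- ===== SOURCE A (Python) =====
-- def split_string(string):
--     """This function splits a string."""
--
--     string_array = string.replace(',', '').split()
--
--     return string_array
--
-- def find_the_longest_word(string):
--     """This function finds the longest word in a string."""
--
--     string_array = split_string(string)
--
--     if string_array is None:
--         return ""
--
--     max_length = len(string_array[0])
--     word_index = 0
--     word = string_array[0]
--
--     for i in range(len(string_array)):
--         word_lenght = len(string_array[i])
--
--         if max_length < word_lenght:
--             max_length = word_lenght
--             word_index = i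
--             word = string_array[i]
--
--     return word_index, word
-- ===== SOURCE B (Python) =====
-- def split_string(string):
--     """This function splits a string."""
--
--     string_array = string.replace(',', '').split()
--
--     return string_array
--
--
-- def find_the_longest_word(string):
--     """Longest word and its index, via a length->first-(index, word) bucket dict."""
--
--     words = split_string(string)
--
--     first_by_len = {}
--     for i, w in enumerate(words):
--         first_by_len.setdefault(len(w), (i, w))
--
--     return first_by_len[max(first_by_len)]
-- ===== Notes on version B (the rewrite author's own statement) =====
-- stated objective: alternative
-- what changed: Instead of A's indexed running-maximum scan over words, B buckets the words by length in one dict pass (setdefault keeps the first (index, word) per length) and then looks up the entry at the maximal length key.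
-- outside the precondition, e.g. on find_the_longest_word(' , '): A raises IndexError, B raises ValueError
import Mathlib
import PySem

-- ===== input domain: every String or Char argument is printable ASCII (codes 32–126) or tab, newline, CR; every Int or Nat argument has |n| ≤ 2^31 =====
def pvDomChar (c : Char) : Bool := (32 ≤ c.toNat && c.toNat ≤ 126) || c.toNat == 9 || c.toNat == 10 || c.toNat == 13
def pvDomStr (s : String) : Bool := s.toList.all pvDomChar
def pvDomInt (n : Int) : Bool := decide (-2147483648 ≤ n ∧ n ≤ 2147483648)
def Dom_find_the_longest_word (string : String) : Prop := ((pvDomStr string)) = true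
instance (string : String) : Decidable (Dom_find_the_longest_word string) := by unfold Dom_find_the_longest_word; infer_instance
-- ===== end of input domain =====

-- B replaces A's indexed running-maximum scan by a length->first-(index, word) bucket dict
-- plus a lookup at the maximal key (alternative decomposition; same cost).

-- ===== PORT A =====
def split_string (string : String) : List String :=
  PySem.Str.split₀ (PySem.Str.replace string "," "")

-- Port of A.  The 'if string_array is None' branch of A is dead code (split never
-- returns None) and is not ported.  string_array[0] raises IndexError on an empty
-- list: pyGet? returns none there (excluded by Pre_; the none branch is arbitrary).
def find_the_longest_word (string : String) : Int × String :=
  let string_array := split_string string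
  match PySem.List.pyGet? string_array 0 with
  | none => (0, "")   -- IndexError in Python
  | some w0 =>
    let st := (PySem.List.pyRange 0 (PySem.List.len string_array) 1).foldl
      (fun (st : Int × Int × String) i =>
        let word_lenght := PySem.Str.len (PySem.List.pyGetD string_array i "")
        if st.1 < word_lenght then (word_lenght, i, PySem.List.pyGetD string_array i "")
        else st)
      (PySem.Str.len w0, 0, w0)
    (st.2.1, st.2.2)

-- ===== PORT B =====
def find_the_longest_word_alt (string : String) : Int × String :=
  let words := split_string string
  let first_by_len := (PySem.List.enumerate words 0).foldl
      (fun (d : PySem.Dict Int (Int × String)) p =>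
        PySem.Dict.setdefault d (PySem.Str.len p.2) p)
      PySem.Dict.empty
  match PySem.List.max? (PySem.Dict.keys first_by_len) (fun k => k) with
  | none => (0, "")   -- ValueError in Python (max of empty dict)
  | some L => PySem.Dict.getD first_by_len L (0, "")

-- ===== PRECONDITION & SPEC =====
-- Pre_ excludes exactly the strings whose word list is empty (only whitespace and
-- commas): there A raises IndexError (string_array[0]) and B raises ValueError.
def Pre_find_the_longest_word (string : String) : Prop :=
  PySem.Str.split₀ (PySem.Str.replace string "," "") ≠ []
instance (string : String) : Decidable (Pre_find_the_longest_word string) := by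
  unfold Pre_find_the_longest_word; infer_instance
def pvWitness_find_the_longest_word : String := "the longest, word"

def Spec_find_the_longest_word (string : String) (out : Int × String) : Prop := out = find_the_longest_word_alt string
instance (string : String) (out : Int × String) : Decidable (Spec_find_the_longest_word string out) := by unfold Spec_find_the_longest_word; infer_instance

-- ===== CLAIM (what is proved, stated in full; the proofs are below) =====
def Claim_equal_find_the_longest_word : Prop := ∀ (string : String), Dom_find_the_longest_word string → Pre_find_the_longest_word string → Spec_find_the_longest_word string (find_the_longest_word string)

-- ===== LEMMAS AND PROOFS =====

-- A's loop body on an (index, word) pair.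
def pvF (st : Int × Int × String) (p : Int × String) : Int × Int × String :=
  if st.1 < PySem.Str.len p.2 then (PySem.Str.len p.2, p.1, p.2) else st

-- A's scan, index-tracking form (s = absolute position of the next element).
def pvScan (s : Nat) (acc : Nat × String) : List String → Nat × String
  | [] => acc
  | x :: r =>
    if PySem.Str.len acc.2 < PySem.Str.len x then pvScan (s + 1) (s, x) r
    else pvScan (s + 1) acc r

-- B's loop body.
def pvStep (d : PySem.Dict Int (Int × String)) (p : Int × String) :
    PySem.Dict Int (Int × String) :=
  PySem.Dict.setdefault d (PySem.Str.len p.2) p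

lemma pvF_fold_eq_scan (t : List String) :
    ∀ (s i : Nat) (w : String),
      (PySem.List.enumerate t (s : Int)).foldl pvF (PySem.Str.len w, (i : Int), w)
        = (PySem.Str.len (pvScan s (i, w) t).2,
           ((pvScan s (i, w) t).1 : Int), (pvScan s (i, w) t).2) := by
  induction t with
  | nil => intro s i w; simp [PySem.List.enumerate, pvScan]
  | cons x r ih =>
    intro s i w
    rw [PySem.List.enumerate_cons]
    simp only [List.foldl_cons, pvScan, pvF]
    by_cases h : PySem.Str.len w < PySem.Str.len x
    · rw [if_pos h, if_pos h]
      have : ((s : Int) + 1) = ((s + 1 : Nat) : Int) := by push_cast; ring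
      rw [this, ih (s + 1) s x]
    · rw [if_neg h, if_neg h]
      have : ((s : Int) + 1) = ((s + 1 : Nat) : Int) := by push_cast; ring
      rw [this, ih (s + 1) i w]

lemma mem_keys_of_get? (d : PySem.Dict Int (Int × String)) (k : Int)
    (v : Int × String) (h : PySem.Dict.get? d k = some v) : k ∈ PySem.Dict.keys d := by
  by_contra hk
  rw [(PySem.Dict.get?_eq_none_iff_not_mem_keys d k).mpr hk] at h
  cases h

-- Core invariant: if d maps the current best length to the current accumulator, and
-- every key of d is at most that length, the same holds after processing the rest.
lemma pvInv (t : List String) :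
    ∀ (s i : Nat) (w : String) (d : PySem.Dict Int (Int × String)),
      PySem.Dict.get? d (PySem.Str.len w) = some ((i : Int), w) →
      (∀ L ∈ PySem.Dict.keys d, L ≤ PySem.Str.len w) →
      PySem.Dict.get? ((PySem.List.enumerate t (s : Int)).foldl pvStep d)
          (PySem.Str.len (pvScan s (i, w) t).2)
        = some (((pvScan s (i, w) t).1 : Int), (pvScan s (i, w) t).2) ∧
      ∀ L ∈ PySem.Dict.keys ((PySem.List.enumerate t (s : Int)).foldl pvStep d),
        L ≤ PySem.Str.len (pvScan s (i, w) t).2 := by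
  induction t with
  | nil => intro s i w d h1 h2; simpa [PySem.List.enumerate, pvScan] using ⟨h1, h2⟩
  | cons x r ih =>
    intro s i w d h1 h2
    rw [PySem.List.enumerate_cons]
    simp only [List.foldl_cons, pvScan, pvStep]
    have hcast : ((s : Int) + 1) = ((s + 1 : Nat) : Int) := by push_cast; ring
    by_cases h : PySem.Str.len w < PySem.Str.len x
    · rw [if_pos h, hcast]
      have hnc : PySem.Dict.contains d (PySem.Str.len x) = false := by
        by_contra hc
        have : PySem.Str.len x ∈ PySem.Dict.keys d :=
          (PySem.Dict.contains_iff_mem_keys d _).mp (by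
            cases hcv : PySem.Dict.contains d (PySem.Str.len x) with
            | false => exact absurd hcv hc
            | true => rfl)
        exact absurd (h2 _ this) (by omega)
      rw [PySem.Dict.setdefault_of_not_contains _ _ hnc]
      exact ih (s + 1) s x _ (PySem.Dict.get?_insert_self _ _ _)
        (fun L hL => by
          rcases (PySem.Dict.mem_keys_insert _ _ _ _).mp hL with hL | hL
          · omega
          · exact le_of_lt (lt_of_le_of_lt (h2 _ hL) h))
    · rw [if_neg h, hcast]
      cases hc : PySem.Dict.contains d (PySem.Str.len x) with
      | true =>
        rw [PySem.Dict.setdefault_of_contains _ _ hc]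
        exact ih (s + 1) i w d h1 h2
      | false =>
        rw [PySem.Dict.setdefault_of_not_contains _ _ hc]
        have hne : PySem.Str.len w ≠ PySem.Str.len x := by
          intro he
          have : PySem.Str.len x ∈ PySem.Dict.keys d :=
            he ▸ mem_keys_of_get? d _ _ h1
          rw [(PySem.Dict.contains_iff_mem_keys d _).mpr this] at hc
          exact Bool.noConfusion hc
        exact ih (s + 1) i w _
          (by rw [PySem.Dict.get?_insert_of_ne _ _ hne]; exact h1)
          (fun L hL => by
            rcases (PySem.Dict.mem_keys_insert _ _ _ _).mp hL with hL | hL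
            · omega
            · exact h2 _ hL)

-- ===== VERDICT (by name: the statement is the Claim_ definition above) =====
theorem find_the_longest_word_spec : Claim_equal_find_the_longest_word := by
  intro string _hdom hpre
  unfold Spec_find_the_longest_word
  unfold Pre_find_the_longest_word at hpre
  obtain ⟨w, t, hwt⟩ : ∃ w t, split_string string = w :: t := by
    cases h : split_string string with
    | nil => exact absurd h hpre
    | cons w t => exact ⟨w, t, rfl⟩
  unfold find_the_longest_word find_the_longest_word_alt
  rw [hwt]
  have hget : PySem.List.pyGet? (w :: t) 0 = some w := by
    simp [PySem.List.pyGet?, PySem.List.pyIdx?]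
  simp only [hget]
  -- turn A's index loop into the fold over the enumerated list
  have hfold :
      (PySem.List.pyRange 0 (PySem.List.len (w :: t)) 1).foldl
        (fun (st : Int × Int × String) i =>
          let word_lenght := PySem.Str.len (PySem.List.pyGetD (w :: t) i "")
          if st.1 < word_lenght then (word_lenght, i, PySem.List.pyGetD (w :: t) i "")
          else st)
        (PySem.Str.len w, 0, w)
        = (PySem.List.enumerate (w :: t) 0).foldl pvF (PySem.Str.len w, 0, w) := by
    rw [PySem.List.enumerate_eq_map_pyRange (w :: t) "", List.foldl_map]
    rfl
  simp only [hfold]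
  rw [PySem.List.enumerate_cons]
  simp only [List.foldl_cons, pvF, lt_irrefl, if_false]
  -- B's dict after the first element
  rw [PySem.Dict.setdefault_of_not_contains _ _ (PySem.Dict.contains_empty _)]
  rw [show ((0 : Int) + 1) = ((1 : Nat) : Int) by norm_num,
      show ((0 : Int)) = ((0 : Nat) : Int) from rfl,
      pvF_fold_eq_scan t 1 0 w]
  rw [show (fun (d : PySem.Dict Int (Int × String)) (p : Int × String) =>
        PySem.Dict.setdefault d (PySem.Str.len p.2) p) = pvStep from rfl]
  obtain ⟨hc1, hc2⟩ := pvInv t 1 0 w _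
    (PySem.Dict.get?_insert_self _ _ _)
    (fun L hL => by
      rcases (PySem.Dict.mem_keys_insert _ _ _ _).mp hL with hL | hL
      · omega
      · rw [PySem.Dict.keys_empty] at hL; exact absurd hL (List.not_mem_nil))
  have hmem : PySem.Str.len (pvScan 1 (0, w) t).2 ∈
      PySem.Dict.keys ((PySem.List.enumerate t ((1 : Nat) : Int)).foldl pvStep
        (PySem.Dict.insert PySem.Dict.empty (PySem.Str.len w) (((0 : Nat) : Int), w))) :=
    mem_keys_of_get? _ _ _ hc1
  cases hmax : PySem.List.max?
      (PySem.Dict.keys ((PySem.List.enumerate t ((1 : Nat) : Int)).foldl pvStep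
        (PySem.Dict.insert PySem.Dict.empty (PySem.Str.len w) (((0 : Nat) : Int), w))))
      (fun k => k) with
  | none =>
    rw [PySem.List.max?_eq_none_iff] at hmax
    rw [hmax] at hmem
    exact absurd hmem (List.not_mem_nil)
  | some L =>
    have hLmem := PySem.List.max?_mem hmax
    have hLmax := PySem.List.max?_isMax hmax _ hmem
    have hLeq : L = PySem.Str.len (pvScan 1 (0, w) t).2 :=
      le_antisymm (hc2 _ hLmem) hLmax
    have hget' : PySem.Dict.get? ((PySem.List.enumerate t ((1 : Nat) : Int)).foldl pvStep
        (PySem.Dict.insert PySem.Dict.empty (PySem.Str.len w) (((0 : Nat) : Int), w))) L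
        = some (((pvScan 1 (0, w) t).1 : Int), (pvScan 1 (0, w) t).2) := by
      rw [hLeq]; exact hc1
    exact (PySem.Dict.getD_of_get?_eq_some _ _ hget').symm
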